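-- pv_equiv track=rewrite | github.com/utachicodes/Project-001 | mafalia_knowledge/mempalace_integration.py | decompress_aaak
-- ===== SOURCE A (Python) =====
-- from typing import Any, Dict, List, Optional, Tuple
--
-- def decompress_aaak(aaak_text: str) -> Dict:
--     """Parse AAAK shorthand back to a dictionary (best effort)."""
--     result = {}
--     for line in aaak_text.strip().split("\n"):
--         if "|" in line and ":" in line:
--             for pair in line.split("|"):
--                 if ":" in pair:
--                     k, v = pair.split(":", 1)
--                     result[k.strip()] = v.strip()
--         elif ":" in line:
--             k, v = line.split(":", 1)
--             result[k.strip()] = v.strip()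
--     return result
-- ===== SOURCE B (Python) =====
-- def decompress_aaak(aaak_text: str) -> dict:
--     """Parse AAAK shorthand back to a dictionary (best effort)."""
--     # Character-level state machine: scan once, emit (key, value) pairs, then
--     # build the dict in a second stage via dict(pairs).
--     pairs = []
--     key, val, has_colon = [], [], False
--     for ch in aaak_text.strip() + "\n":
--         if ch == "|" or ch == "\n":
--             if has_colon:
--                 pairs.append(("".join(key).strip(), "".join(val).strip()))
--             key, val, has_colon = [], [], False
--         elif ch == ":" and not has_colon:
--             has_colon = True
--         elif has_colon:
--             val.append(ch)
--         else:
--             key.append(ch)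
--     return dict(pairs)
-- ===== Notes on version B (the rewrite author's own statement) =====
-- stated objective: alternative
-- what changed: B replaces A's split-based nested line/pair loops with a character-level state machine that scans the text once char by char (key/value buffers plus a colon flag), emits a flat list of (key, value) pairs, and then builds the dictionary in a separate second stage via dict(pairs).
import Mathlib
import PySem

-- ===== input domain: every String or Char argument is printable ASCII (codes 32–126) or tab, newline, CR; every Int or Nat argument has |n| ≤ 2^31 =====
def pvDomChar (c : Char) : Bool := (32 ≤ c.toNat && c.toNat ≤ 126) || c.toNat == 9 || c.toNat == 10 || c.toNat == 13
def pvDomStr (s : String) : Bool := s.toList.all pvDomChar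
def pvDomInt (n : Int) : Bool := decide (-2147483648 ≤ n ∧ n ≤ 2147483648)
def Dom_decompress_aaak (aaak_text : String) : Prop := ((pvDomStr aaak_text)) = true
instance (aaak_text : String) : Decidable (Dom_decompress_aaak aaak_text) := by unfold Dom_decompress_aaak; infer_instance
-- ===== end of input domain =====

-- B replaces A's split-based nested line/pair loops with a one-pass character
-- state machine emitting a flat (key, value) pair list, then dict(pairs);
-- same return value, a different (scanner + staged build) decomposition.

-- ===== PORT A =====
def decompress_aaak (aaak_text : String) : List (String × String) :=
  ((PySem.Chars.splitOn (PySem.Chars.strip aaak_text.toList) ['\n']).foldl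
    (fun result line =>
      if PySem.Chars.isIn ['|'] line && PySem.Chars.isIn [':'] line then
        (PySem.Chars.splitOn line ['|']).foldl
          (fun result pair =>
            if PySem.Chars.isIn [':'] pair then
              match PySem.Chars.splitOnMax pair [':'] 1 with
              | [k, v] =>
                  result.insert (String.ofList (PySem.Chars.strip k))
                    (String.ofList (PySem.Chars.strip v))
              | _ => result
            else result) result
      else if PySem.Chars.isIn [':'] line then
        match PySem.Chars.splitOnMax line [':'] 1 with
        | [k, v] =>
            result.insert (String.ofList (PySem.Chars.strip k))
              (String.ofList (PySem.Chars.strip v))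
        | _ => result
      else result)
    (PySem.Dict.empty : PySem.Dict String String)).items

-- ===== PORT B =====
-- the loop body of B's character scan (state = (pairs, key, val, has_colon))
def pvStepB (st : List (String × String) × List Char × List Char × Bool) (ch : Char) :
    List (String × String) × List Char × List Char × Bool :=
  match st with
  | (pairs, key, val, has_colon) =>
    if ch = '|' ∨ ch = '\n' then
      ((if has_colon then
          pairs ++ [(String.ofList (PySem.Chars.strip key), String.ofList (PySem.Chars.strip val))]
        else pairs), [], [], false)
    else if ch = ':' ∧ has_colon = false then (pairs, key, val, true)
    else if has_colon then (pairs, key, val ++ [ch], has_colon)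
    else (pairs, key ++ [ch], val, has_colon)

def decompress_aaak_alt (aaak_text : String) : List (String × String) :=
  let final := (PySem.Chars.strip aaak_text.toList ++ ['\n']).foldl pvStepB ([], [], [], false)
  (PySem.Dict.ofList final.1).items

-- ===== PRECONDITION & SPEC =====
def Spec_decompress_aaak (aaak_text : String) (out : List (String × String)) : Prop := out = decompress_aaak_alt aaak_text
instance (aaak_text : String) (out : List (String × String)) : Decidable (Spec_decompress_aaak aaak_text out) := by unfold Spec_decompress_aaak; infer_instance

-- ===== CLAIM (what is proved, stated in full; the proofs are below) =====
def Claim_equal_decompress_aaak : Prop := ∀ (aaak_text : String), Dom_decompress_aaak aaak_text → Spec_decompress_aaak aaak_text (decompress_aaak aaak_text)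

-- ===== LEMMAS AND PROOFS =====

def pvP (c : Char) : Bool := c == '|' || c == '\n'

-- the pair a token contributes (split at the first ':'), shared shape of both sides
def pvTokPair (tok : List Char) : Option (String × String) :=
  if ':' ∈ tok then
    some (String.ofList (PySem.Chars.strip (tok.takeWhile (· ≠ ':'))),
          String.ofList (PySem.Chars.strip ((tok.dropWhile (· ≠ ':')).tail)))
  else none

-- the per-token action of A's inner branches
def pvStep (result : PySem.Dict String String) (tok : List Char) : PySem.Dict String String :=
  if PySem.Chars.isIn [':'] tok then
    match PySem.Chars.splitOnMax tok [':'] 1 with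
    | [k, v] =>
        result.insert (String.ofList (PySem.Chars.strip k))
          (String.ofList (PySem.Chars.strip v))
    | _ => result
  else result

def pvFlush (key val : List Char) (b : Bool) : List (String × String) :=
  if b then [(String.ofList (PySem.Chars.strip key), String.ofList (PySem.Chars.strip val))] else []

-- mirror of B's fold as a recursive scanner
def pvScan (key val : List Char) (b : Bool) : List Char → List (String × String)
  | [] => pvFlush key val b
  | c :: t =>
    if pvP c then pvFlush key val b ++ pvScan [] [] false t
    else if c = ':' ∧ b = false then pvScan key val true t
    else if b then pvScan key (val ++ [c]) b t
    else pvScan (key ++ [c]) val b t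

def pvRepr (key val : List Char) (b : Bool) : List Char :=
  if b then key ++ ':' :: val else key

-- ===== A-side split lemmas =====

theorem pv_splitOn_go_eq (c : Char) (fuel : Nat) (l r : List Char) (acc : List (List Char))
    (h : l.length < fuel) :
    PySem.Chars.splitOn.go [c] fuel l r acc
      = acc.reverse ++ (l.splitOnP (· == c)).modifyHead (r.reverse ++ ·) := by
  induction fuel generalizing l r acc with
  | zero => omega
  | succ n ih =>
    cases l with
    | nil => simp [PySem.Chars.splitOn.go, List.splitOnP_nil]
    | cons x t =>
      rw [PySem.Chars.splitOn.go]
      by_cases hx : x = c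
      · subst hx
        have hp : List.isPrefixOf [x] (x :: t) = true := by simp [List.isPrefixOf]
        simp only [hp, if_pos, List.length_cons, List.length_nil, List.drop_succ_cons, List.drop_zero]
        rw [ih t [] (r.reverse :: acc) (by simpa using Nat.lt_of_succ_lt_succ h)]
        simp [List.splitOnP_cons]
        exact congrFun List.modifyHead_id _
      · have hp : List.isPrefixOf [c] (x :: t) = false := by
          simp [List.isPrefixOf]; exact fun hh => (hx hh.symm)
        simp only [hp]
        rw [if_neg (by simp)]
        rw [ih t (x :: r) acc (by simpa using Nat.lt_of_succ_lt_succ h)]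
        rw [List.splitOnP_cons]
        rw [if_neg (by simp [hx])]
        rw [List.modifyHead_modifyHead]
        congr 1
        congr 1
        funext y
        simp

theorem pv_splitOn_eq (c : Char) (l : List Char) :
    PySem.Chars.splitOn l [c] = l.splitOnP (· == c) := by
  rw [PySem.Chars.splitOn, pv_splitOn_go_eq c (l.length+1) l [] [] (by omega)]
  simp
  show List.modifyHead id _ = _
  rw [List.modifyHead_id]
  rfl

theorem pv_isIn_singleton (c : Char) (l : List Char) :
    PySem.Chars.isIn [c] l = true ↔ c ∈ l := by
  rw [PySem.Chars.isIn_iff_infix]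
  constructor
  · rintro ⟨s, t, rfl⟩; simp
  · intro h
    rcases List.mem_iff_append.mp h with ⟨s, t, rfl⟩
    exact ⟨s, t, by simp⟩

theorem pv_mem_splitOnP (p : Char → Bool) (l : List Char) (a : Char) :
    ∀ (x : List Char), x ∈ l.splitOnP p → a ∈ x → a ∈ l := by
  induction l with
  | nil =>
    intro x hx ha
    rw [List.splitOnP_nil, List.mem_singleton] at hx
    subst hx; exact absurd ha (by simp)
  | cons y t ih =>
    intro x hx ha
    rw [List.splitOnP_cons] at hx
    by_cases hy : p y = true
    · rw [if_pos hy] at hx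
      rcases List.mem_cons.mp hx with hx | hx
      · subst hx; exact absurd ha (by simp)
      · exact List.mem_cons_of_mem _ (ih x hx ha)
    · rw [if_neg hy] at hx
      cases hsp : t.splitOnP p with
      | nil => exact absurd hsp (List.splitOnP_ne_nil p t)
      | cons h0 tl =>
        rw [hsp, List.modifyHead_cons] at hx
        rcases List.mem_cons.mp hx with hx | hx
        · subst hx
          rcases List.mem_cons.mp ha with rfl | ha'
          · exact List.mem_cons_self
          · exact List.mem_cons_of_mem _ (ih h0 (by simp [hsp]) ha')
        · exact List.mem_cons_of_mem _ (ih x (by simp [hsp, hx]) ha)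

theorem pv_splitOnP_of_not_exists (p : Char → Bool) (l : List Char)
    (h : ∀ a ∈ l, p a = false) : l.splitOnP p = [l] := by
  induction l with
  | nil => simp
  | cons x t ih =>
    rw [List.splitOnP_cons, if_neg (by simp [h x List.mem_cons_self]),
      ih (fun a ha => h a (List.mem_cons_of_mem _ ha))]
    rfl

theorem pv_flatMap_splitOn (l : List Char) :
    (l.splitOnP (· == '\n')).flatMap (fun t => t.splitOnP (· == '|')) = l.splitOnP pvP := by
  induction l with
  | nil => simp
  | cons x t ih =>
    rw [List.splitOnP_cons, List.splitOnP_cons]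
    by_cases hn : x = '\n'
    · subst hn
      rw [if_pos (by simp), if_pos (by simp [pvP]), List.flatMap_cons, List.splitOnP_nil, ← ih]
      rfl
    · rw [if_neg (by simp [hn])]
      by_cases hb : x = '|'
      · subst hb
        rw [if_pos (by simp [pvP]), ← ih]
        cases hsp : t.splitOnP (· == '\n') with
        | nil => exact absurd hsp (List.splitOnP_ne_nil _ t)
        | cons h0 tl =>
          rw [List.modifyHead_cons, List.flatMap_cons, List.flatMap_cons,
            List.splitOnP_cons, if_pos (by simp)]
          rfl
      · rw [if_neg (by simp [pvP, hb, hn]), ← ih]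
        cases hsp : t.splitOnP (· == '\n') with
        | nil => exact absurd hsp (List.splitOnP_ne_nil _ t)
        | cons h0 tl =>
          rw [List.modifyHead_cons, List.flatMap_cons, List.flatMap_cons,
            List.splitOnP_cons, if_neg (by simp [hb])]
          cases hsp2 : h0.splitOnP (· == '|') with
          | nil => exact absurd hsp2 (List.splitOnP_ne_nil _ h0)
          | cons g0 gl => simp

theorem pv_foldl_step_nop (L : List (List Char)) (d : PySem.Dict String String)
    (h : ∀ tok ∈ L, PySem.Chars.isIn [':'] tok = false) :
    L.foldl pvStep d = d := by
  induction L generalizing d with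
  | nil => rfl
  | cons t ts ih =>
    rw [List.foldl_cons]
    have ht := h t List.mem_cons_self
    rw [show pvStep d t = d from by simp [pvStep, ht]]
    exact ih d (fun tok htok => h tok (List.mem_cons_of_mem _ htok))

theorem pv_lineAct (d : PySem.Dict String String) (line : List Char) :
    (if PySem.Chars.isIn ['|'] line && PySem.Chars.isIn [':'] line then
        (PySem.Chars.splitOn line ['|']).foldl pvStep d
      else if PySem.Chars.isIn [':'] line then
        match PySem.Chars.splitOnMax line [':'] 1 with
        | [k, v] =>
            d.insert (String.ofList (PySem.Chars.strip k))
              (String.ofList (PySem.Chars.strip v))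
        | _ => d
      else d)
      = (line.splitOnP (· == '|')).foldl pvStep d := by
  by_cases hpipe : PySem.Chars.isIn ['|'] line = true
  · by_cases hcolon : PySem.Chars.isIn [':'] line = true
    · rw [if_pos (by simp [hpipe, hcolon]), pv_splitOn_eq]
    · rw [if_neg (by simp [hcolon]), if_neg hcolon]
      refine (pv_foldl_step_nop _ d ?_).symm
      intro tok htok
      rw [Bool.eq_false_iff]
      intro habs
      exact hcolon ((pv_isIn_singleton _ _).mpr
        (pv_mem_splitOnP _ _ _ tok htok ((pv_isIn_singleton _ _).mp habs)))
  · rw [if_neg (by simp [hpipe])]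
    have hnot : '|' ∉ line := fun hm => hpipe ((pv_isIn_singleton _ _).mpr hm)
    rw [pv_splitOnP_of_not_exists _ _ (fun a ha => by
      simp only [beq_eq_false_iff_ne, ne_eq]
      rintro rfl; exact hnot ha)]
    rw [List.foldl_cons, List.foldl_nil]
    rfl

-- splitOnMax on a single ':' with maxsplit 1 splits at the first colon
theorem pv_splitOnMax_go_eq (fuel : Nat) (l cur : List Char) (acc : List (List Char))
    (h : l.length < fuel) (hc : ':' ∈ l) :
    PySem.Chars.splitOnMax.go [':'] fuel 1 l cur acc
      = acc.reverse ++ [cur.reverse ++ l.takeWhile (· ≠ ':'), (l.dropWhile (· ≠ ':')).tail] := by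
  induction fuel generalizing l cur acc with
  | zero => omega
  | succ n ih =>
    cases l with
    | nil => exact absurd hc (by simp)
    | cons c t =>
      rw [PySem.Chars.splitOnMax.go]
      by_cases hcolon : c = ':'
      · subst hcolon
        have hp : List.isPrefixOf [':'] (':' :: t) = true := by simp [List.isPrefixOf]
        rw [if_neg (by omega), if_pos hp]
        have htw : (':' :: t).takeWhile (fun c => decide (c ≠ ':')) = [] := by simp
        have hdw : (':' :: t).dropWhile (fun c => decide (c ≠ ':')) = ':' :: t := by simp
        simp only [htw, hdw, List.tail_cons, List.length_singleton, List.drop_succ_cons,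
          List.drop_zero]
        -- one more step with m = 0
        cases n with
        | zero => simp at h
        | succ m =>
          cases t with
          | nil => simp [PySem.Chars.splitOnMax.go]
          | cons y ys => simp [PySem.Chars.splitOnMax.go]
      · have hp : List.isPrefixOf [':'] (c :: t) = false := by
          simp [List.isPrefixOf]; exact fun hh => (hcolon hh.symm)
        rw [if_neg (by omega), if_neg (by simp [hp])]
        have hct : ':' ∈ t := by rcases List.mem_cons.mp hc with rfl | h' <;> first | exact absurd rfl hcolon | exact h'
        rw [ih t (c :: cur) acc (by simpa using Nat.lt_of_succ_lt_succ h) hct]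
        simp [hcolon]

theorem pv_splitOnMax_eq (tok : List Char) (hc : ':' ∈ tok) :
    PySem.Chars.splitOnMax tok [':'] 1
      = [tok.takeWhile (· ≠ ':'), (tok.dropWhile (· ≠ ':')).tail] := by
  rw [PySem.Chars.splitOnMax, if_neg (by omega)]
  have : (1 : Int).toNat = 1 := rfl
  rw [this, pv_splitOnMax_go_eq (tok.length + 1) tok [] [] (by omega) hc]
  simp

-- A's per-token action is exactly the pvTokPair rule
theorem pv_step_tokPair (d : PySem.Dict String String) (tok : List Char) :
    pvStep d tok = match pvTokPair tok with
      | none => d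
      | some (k, v) => d.insert k v := by
  unfold pvStep pvTokPair
  by_cases hc : ':' ∈ tok
  · rw [if_pos ((pv_isIn_singleton _ _).mpr hc), if_pos hc, pv_splitOnMax_eq tok hc]
  · rw [if_neg (fun h => hc ((pv_isIn_singleton _ _).mp h)), if_neg hc]

theorem pv_foldl_step_filterMap (L : List (List Char)) (d : PySem.Dict String String) :
    L.foldl pvStep d
      = (L.filterMap pvTokPair).foldl (fun d p => d.insert p.1 p.2) d := by
  induction L generalizing d with
  | nil => rfl
  | cons t ts ih =>
    rw [List.foldl_cons, List.filterMap_cons, pv_step_tokPair]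
    cases h : pvTokPair t with
    | none => exact ih d
    | some p => rw [List.foldl_cons]; exact ih _

-- ===== B-side scanner lemmas =====

theorem pv_fold_stepB_eq_scan (l : List Char) :
    ∀ (ps : List (String × String)) (k v : List Char) (b : Bool),
    (l ++ ['\n']).foldl pvStepB (ps, k, v, b) = (ps ++ pvScan k v b l, [], [], false) := by
  induction l with
  | nil =>
    intro ps k v b
    simp only [List.nil_append, List.foldl_cons, List.foldl_nil, pvScan]
    rw [show pvStepB (ps, k, v, b) '\n' = (ps ++ pvFlush k v b, [], [], false) from by
      cases b <;> simp [pvStepB, pvFlush]]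
  | cons c t ih =>
    intro ps k v b
    rw [List.cons_append, List.foldl_cons]
    by_cases hd : c = '|' ∨ c = '\n'
    · rw [show pvStepB (ps, k, v, b) c = (ps ++ pvFlush k v b, [], [], false) from by
        cases b <;> simp [pvStepB, hd, pvFlush]]
      rw [ih, show pvScan k v b (c :: t) = pvFlush k v b ++ pvScan [] [] false t from by
        rw [pvScan, if_pos (by rcases hd with rfl | rfl <;> simp [pvP])]]
      simp
    · have hd' : c ≠ '|' ∧ c ≠ '\n' := ⟨fun h => hd (Or.inl h), fun h => hd (Or.inr h)⟩
      have hP : pvP c = false := by simp [pvP, hd'.1, hd'.2]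
      by_cases hcb : c = ':' ∧ b = false
      · rw [show pvStepB (ps, k, v, b) c = (ps, k, v, true) from by
          simp [pvStepB, hcb]]
        rw [ih, show pvScan k v b (c :: t) = pvScan k v true t from by
          rw [pvScan, if_neg (by simp [hP]), if_pos hcb]]
      · by_cases hb : b = true
        · rw [show pvStepB (ps, k, v, b) c = (ps, k, v ++ [c], b) from by
            simp [pvStepB, hd'.1, hd'.2, hb]]
          rw [ih, show pvScan k v b (c :: t) = pvScan k (v ++ [c]) b t from by
            rw [pvScan, if_neg (by simp [hP]), if_neg hcb, if_pos hb]]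
        · have hbf : b = false := by cases b with | false => rfl | true => exact absurd rfl hb
          have hc' : c ≠ ':' := fun h => hcb ⟨h, hbf⟩
          rw [show pvStepB (ps, k, v, b) c = (ps, k ++ [c], v, b) from by
            simp [pvStepB, hd'.1, hd'.2, hc', hbf]]
          rw [ih, show pvScan k v b (c :: t) = pvScan (k ++ [c]) v b t from by
            rw [pvScan, if_neg (by simp [hP]), if_neg hcb, if_neg (by simp [hbf])]]

theorem pv_splitOnP_append_left (p : Char → Bool) (pre l : List Char)
    (h : ∀ a ∈ pre, p a = false) :
    (pre ++ l).splitOnP p = (l.splitOnP p).modifyHead (pre ++ ·) := by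
  induction pre with
  | nil =>
    rw [List.nil_append,
      show (fun x => ([] : List Char) ++ x) = id from by funext x; rfl]
    exact (congrFun List.modifyHead_id _).symm
  | cons x t ih =>
    rw [List.cons_append, List.splitOnP_cons, if_neg (by simp [h x List.mem_cons_self]),
      ih (fun a ha => h a (List.mem_cons_of_mem _ ha)), List.modifyHead_modifyHead]
    congr 1

theorem pv_filterMap_repr_cons (k v : List Char) (b : Bool) (rest : List (List Char))
    (hk : ':' ∉ k) :
    (pvRepr k v b :: rest).filterMap pvTokPair = pvFlush k v b ++ rest.filterMap pvTokPair := by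
  cases b with
  | false =>
    rw [show pvRepr k v false = k from rfl, show pvFlush k v false = [] from rfl]
    rw [List.filterMap_cons, show pvTokPair k = none from by simp [pvTokPair, hk]]
    simp
  | true =>
    rw [show pvRepr k v true = k ++ ':' :: v from rfl,
      show pvFlush k v true
        = [(String.ofList (PySem.Chars.strip k), String.ofList (PySem.Chars.strip v))] from rfl]
    rw [List.filterMap_cons]
    have htw : (k ++ ':' :: v).takeWhile (fun c => decide (c ≠ ':')) = k := by
      rw [List.takeWhile_append_of_pos (by intro a ha; simp; rintro rfl; exact hk ha)]
      simp
    have hdw : (k ++ ':' :: v).dropWhile (fun c => decide (c ≠ ':')) = ':' :: v := by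
      rw [List.dropWhile_append_of_pos (by intro a ha; simp; rintro rfl; exact hk ha)]
      simp
    rw [show pvTokPair (k ++ ':' :: v)
        = some (String.ofList (PySem.Chars.strip k), String.ofList (PySem.Chars.strip v)) from by
      unfold pvTokPair
      rw [if_pos (by simp), htw, hdw]
      rfl]
    rfl

theorem pv_repr_nodelim (k v : List Char) (b : Bool)
    (hkP : ∀ c ∈ k, pvP c = false) (hvP : ∀ c ∈ v, pvP c = false) :
    ∀ a ∈ pvRepr k v b, pvP a = false := by
  intro a ha
  cases b with
  | false => exact hkP a (by simpa [pvRepr] using ha)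
  | true =>
    rw [show pvRepr k v true = k ++ ':' :: v from rfl] at ha
    rcases List.mem_append.mp ha with ha | ha
    · exact hkP a ha
    · rcases List.mem_cons.mp ha with rfl | ha
      · simp [pvP]
      · exact hvP a ha

theorem pv_scan_eq_tokens (l : List Char) :
    ∀ (k v : List Char) (b : Bool), ':' ∉ k → (∀ c ∈ k, pvP c = false) →
    (∀ c ∈ v, pvP c = false) → (b = false → v = []) →
    pvScan k v b l = ((pvRepr k v b ++ l).splitOnP pvP).filterMap pvTokPair := by
  induction l with
  | nil =>
    intro k v b hk hkP hvP hbv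
    rw [List.append_nil, pv_splitOnP_of_not_exists _ _ (pv_repr_nodelim k v b hkP hvP)]
    rw [show ([pvRepr k v b] : List (List Char)) = pvRepr k v b :: [] from rfl,
      pv_filterMap_repr_cons k v b [] hk]
    simp [pvScan]
  | cons c t ih =>
    intro k v b hk hkP hvP hbv
    by_cases hP : pvP c = true
    · rw [show pvScan k v b (c :: t) = pvFlush k v b ++ pvScan [] [] false t from by
        rw [pvScan, if_pos hP]]
      rw [ih [] [] false (by simp) (by simp) (by simp) (fun _ => rfl)]
      rw [pv_splitOnP_append_left pvP _ _ (pv_repr_nodelim k v b hkP hvP),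
        List.splitOnP_cons, if_pos hP, List.modifyHead_cons, List.append_nil,
        pv_filterMap_repr_cons k v b _ hk]
      congr 2
    · by_cases hcb : c = ':' ∧ b = false
      · obtain ⟨rfl, rfl⟩ := hcb
        have hv : v = [] := hbv rfl
        subst hv
        rw [show pvScan k [] false (':' :: t) = pvScan k [] true t from by
          rw [pvScan, if_neg (by simp [hP]), if_pos ⟨rfl, rfl⟩]]
        rw [ih k [] true hk hkP (by simp) (fun h => Bool.noConfusion h)]
        simp [pvRepr]
      · by_cases hb : b = true
        · subst hb
          rw [show pvScan k v true (c :: t) = pvScan k (v ++ [c]) true t from by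
            rw [pvScan, if_neg (by simp [hP]), if_neg hcb, if_pos rfl]]
          rw [ih k (v ++ [c]) true hk hkP (by
              intro x hx
              rcases List.mem_append.mp hx with h | h
              · exact hvP x h
              · rw [List.mem_singleton] at h; subst h; simpa using hP)
            (fun h => Bool.noConfusion h)]
          simp [pvRepr]
        · have hb' : b = false := by cases b with | false => rfl | true => exact absurd rfl hb
          subst hb'
          have hv : v = [] := hbv rfl
          subst hv
          have hc' : c ≠ ':' := fun h => hcb ⟨h, rfl⟩
          rw [show pvScan k [] false (c :: t) = pvScan (k ++ [c]) [] false t from by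
            rw [pvScan, if_neg (by simp [hP]), if_neg hcb, if_neg (by simp)]]
          rw [ih (k ++ [c]) [] false (by
              intro h
              rcases List.mem_append.mp h with h | h
              · exact hk h
              · rw [List.mem_singleton] at h; exact hc' h.symm)
            (by
              intro x hx
              rcases List.mem_append.mp hx with h | h
              · exact hkP x h
              · rw [List.mem_singleton] at h; subst h; simpa using hP)
            (by simp) (fun _ => rfl)]
          simp [pvRepr]

-- ===== VERDICT (by name: the statement is the Claim_ definition above) =====
theorem decompress_aaak_spec : Claim_equal_decompress_aaak := by
  intro s _hd
  show decompress_aaak s = decompress_aaak_alt s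
  rw [show decompress_aaak_alt s
      = (PySem.Dict.ofList
          (((PySem.Chars.strip s.toList ++ ['\n']).foldl pvStepB ([], [], [], false)).1)).items from rfl]
  rw [pv_fold_stepB_eq_scan]
  rw [show (([] ++ pvScan [] [] false (PySem.Chars.strip s.toList), ([] : List Char),
        ([] : List Char), false)).1 = pvScan [] [] false (PySem.Chars.strip s.toList) from by simp]
  rw [pv_scan_eq_tokens _ [] [] false (by simp) (by simp) (by simp) (fun _ => rfl)]
  unfold decompress_aaak
  congr 1
  rw [pv_splitOn_eq]
  rw [show (pvRepr [] [] false ++ PySem.Chars.strip s.toList) = PySem.Chars.strip s.toList from by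
    simp [pvRepr]]
  rw [show (PySem.Dict.ofList
        (((PySem.Chars.strip s.toList).splitOnP pvP).filterMap pvTokPair)
        : PySem.Dict String String)
      = (((PySem.Chars.strip s.toList).splitOnP pvP).filterMap pvTokPair).foldl
          (fun d p => d.insert p.1 p.2) PySem.Dict.empty from rfl]
  rw [← pv_foldl_step_filterMap, ← pv_flatMap_splitOn, List.foldl_flatMap]
  exact List.foldl_ext _ _ _ (fun d line _ => pv_lineAct d line)
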